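-- pv_equiv track=rewrite | github.com/aaronsrhodes2/remnant-silly | docker/diag/app.py | _categorize_log_lines
-- ===== SOURCE A (Python) =====
-- def _categorize_log_lines(lines: list[str]) -> dict:
--     errors, warnings = [], []
--     for line in lines:
--         low = line.lower()
--         if any(tok in low for tok in ("error", "fatal", "traceback", "exception", "fail")):
--             errors.append(line)
--         elif "warn" in low:
--             warnings.append(line)
--     return {"errors": errors[-20:], "warnings": warnings[-20:]}
-- ===== SOURCE B (Python) =====
-- def _categorize_log_lines(lines: list[str]) -> dict:
--     errors, warnings = [], []
--     for line in reversed(lines):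
--         if len(errors) >= 20 and len(warnings) >= 20:
--             break
--         low = line.lower()
--         if any(tok in low for tok in ("error", "fatal", "traceback", "exception", "fail")):
--             if len(errors) < 20:
--                 errors.append(line)
--         elif "warn" in low:
--             if len(warnings) < 20:
--                 warnings.append(line)
--     return {"errors": errors[::-1], "warnings": warnings[::-1]}
-- ===== Notes on version B (the rewrite author's own statement) =====
-- stated objective: alternative
-- what changed: B scans the lines in reverse, filling each 20-element bucket from the back and breaking as soon as both buckets are full, then reverses the buckets, instead of A's full forward pass that collects every match and slices the last 20 at the end.
import Mathlib
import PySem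

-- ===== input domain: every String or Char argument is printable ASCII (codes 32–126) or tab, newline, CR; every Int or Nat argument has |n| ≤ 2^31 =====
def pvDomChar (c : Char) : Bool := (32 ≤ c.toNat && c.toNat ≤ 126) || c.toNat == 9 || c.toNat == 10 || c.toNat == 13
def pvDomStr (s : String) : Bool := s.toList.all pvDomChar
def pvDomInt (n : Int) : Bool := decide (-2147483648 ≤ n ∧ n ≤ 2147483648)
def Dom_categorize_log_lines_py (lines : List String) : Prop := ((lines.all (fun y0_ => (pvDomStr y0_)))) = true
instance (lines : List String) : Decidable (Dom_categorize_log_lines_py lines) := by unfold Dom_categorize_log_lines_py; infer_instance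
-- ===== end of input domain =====

-- B replaces A's full forward pass + final [-20:] slices by a reverse scan that fills each
-- 20-line bucket from the back with an early break once both are full (objective: alternative).


-- ===== PORT A =====
-- shared helper (the identical test appears verbatim in both Pythons):
-- any(tok in low for tok in ("error", "fatal", "traceback", "exception", "fail"))
def pvErrTest (low : String) : Bool :=
  (["error", "fatal", "traceback", "exception", "fail"] : List String).any
    (fun tok => PySem.Str.isIn tok low)

-- "warn" in low
def pvWarnTest (low : String) : Bool := PySem.Str.isIn "warn" low

-- A's loop body
def pvStepA (acc : List String × List String) (line : String) : List String × List String :=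
  let low := PySem.Str.lower line
  if pvErrTest low then (acc.1 ++ [line], acc.2)
  else if pvWarnTest low then (acc.1, acc.2 ++ [line])
  else acc

def categorize_log_lines_py (lines : List String) : List (String × List String) :=
  let p := lines.foldl pvStepA ([], [])
  [("errors", PySem.List.slice p.1 (some (-20)) none),
   ("warnings", PySem.List.slice p.2 (some (-20)) none)]

-- ===== PORT B =====
-- the 'for line in reversed(lines)' loop with its break: structural recursion over the reversed list
def pvGo : List String → List String → List String → List String × List String
  | [], errors, warnings => (errors, warnings)
  | line :: rest, errors, warnings =>
    if 20 ≤ errors.length ∧ 20 ≤ warnings.length then (errors, warnings)   -- break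
    else
      let low := PySem.Str.lower line
      if pvErrTest low then
        (if errors.length < 20 then pvGo rest (errors ++ [line]) warnings
         else pvGo rest errors warnings)
      else if pvWarnTest low then
        (if warnings.length < 20 then pvGo rest errors (warnings ++ [line])
         else pvGo rest errors warnings)
      else pvGo rest errors warnings

def categorize_log_lines_py_alt (lines : List String) : List (String × List String) :=
  let p := pvGo lines.reverse [] []
  [("errors", p.1.reverse), ("warnings", p.2.reverse)]

-- ===== PRECONDITION & SPEC =====
def Spec_categorize_log_lines_py (lines : List String) (out : List (String × List String)) : Prop := out = categorize_log_lines_py_alt lines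
instance (lines : List String) (out : List (String × List String)) : Decidable (Spec_categorize_log_lines_py lines out) := by unfold Spec_categorize_log_lines_py; infer_instance

-- ===== CLAIM (what is proved, stated in full; the proofs are below) =====
def Claim_equal_categorize_log_lines_py : Prop := ∀ (lines : List String), Dom_categorize_log_lines_py lines → Spec_categorize_log_lines_py lines (categorize_log_lines_py lines)

-- ===== LEMMAS AND PROOFS =====

-- the two membership tests, as predicates on a whole line
def pvP (line : String) : Bool := pvErrTest (PySem.Str.lower line)
def pvQ (line : String) : Bool := !pvP line && pvWarnTest (PySem.Str.lower line)

-- A's loop collects exactly the P-lines and Q-lines, in order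
theorem pvFoldA (l : List String) (es ws : List String) :
    l.foldl pvStepA (es, ws) = (es ++ l.filter pvP, ws ++ l.filter pvQ) := by
  induction l generalizing es ws with
  | nil => simp
  | cons x t ih =>
    simp only [List.foldl_cons, List.filter_cons]
    by_cases hp : pvErrTest (PySem.Str.lower x)
    · simp [pvStepA, hp, ih, pvP, pvQ]
    · by_cases hw : pvWarnTest (PySem.Str.lower x) <;>
        simp [pvStepA, hp, hw, ih, pvP, pvQ]

-- B's loop fills each bucket up to 20, from the front of its (reversed) input
theorem pvGoSpec (l : List String) (es ws : List String)
    (he : es.length ≤ 20) (hw : ws.length ≤ 20) :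
    pvGo l es ws =
      (es ++ (l.filter pvP).take (20 - es.length),
       ws ++ (l.filter pvQ).take (20 - ws.length)) := by
  induction l generalizing es ws with
  | nil => simp [pvGo]
  | cons x t ih =>
    rw [pvGo]
    by_cases hfull : 20 ≤ es.length ∧ 20 ≤ ws.length
    · have h1 : 20 - es.length = 0 := by omega
      have h2 : 20 - ws.length = 0 := by omega
      simp [hfull, h1, h2]
    · simp only [if_neg hfull, List.filter_cons]
      by_cases hp : pvErrTest (PySem.Str.lower x)
      · have hPx : pvP x = true := hp
        have hQx : pvQ x = false := by simp [pvQ, hPx]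
        rw [if_pos hp]
        by_cases hlt : es.length < 20
        · rw [if_pos hlt, ih (es ++ [x]) ws (by simp; omega) hw]
          have h3 : 20 - es.length = (20 - (es ++ [x]).length) + 1 := by simp; omega
          simp [hPx, hQx, h3]
        · rw [if_neg hlt, ih es ws he hw]
          have h1 : 20 - es.length = 0 := by omega
          simp [hPx, hQx, h1]
      · have hPx : pvP x = false := by simp [pvP, hp]
        rw [if_neg hp]
        by_cases hwn : pvWarnTest (PySem.Str.lower x)
        · have hQx : pvQ x = true := by simp [pvQ, hPx, hwn]
          rw [if_pos hwn]
          by_cases hlt : ws.length < 20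
          · rw [if_pos hlt, ih es (ws ++ [x]) he (by simp; omega)]
            have h3 : 20 - ws.length = (20 - (ws ++ [x]).length) + 1 := by simp; omega
            simp [hPx, hQx, h3]
          · rw [if_neg hlt, ih es ws he hw]
            have h2 : 20 - ws.length = 0 := by omega
            simp [hPx, hQx, h2]
        · have hQx : pvQ x = false := by simp [pvQ, hwn]
          rw [if_neg hwn, ih es ws he hw]
          simp [hPx, hQx]

-- [-20:] of xs is the reverse of the first 20 of xs reversed
theorem pvLastTwenty (xs : List String) :
    xs.drop (xs.length - 20) = (xs.reverse.take 20).reverse := by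
  rw [List.take_reverse, List.reverse_reverse]

-- ===== VERDICT (by name: the statement is the Claim_ definition above) =====
theorem categorize_log_lines_py_spec : Claim_equal_categorize_log_lines_py := by
  intro lines _
  show categorize_log_lines_py lines = categorize_log_lines_py_alt lines
  unfold categorize_log_lines_py categorize_log_lines_py_alt
  rw [pvFoldA, pvGoSpec lines.reverse [] [] (by simp) (by simp)]
  simp only [List.nil_append, List.filter_reverse]
  rw [PySem.List.slice_from_neg_ofNat _ 20 (by omega),
      PySem.List.slice_from_neg_ofNat _ 20 (by omega),
      pvLastTwenty, pvLastTwenty]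
  simp
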